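-- pv_equiv track=rewrite | github.com/devale/AOC2020 | day14/day14.py | gen_combinations
-- ===== SOURCE A (Python) =====
-- from itertools import product
--
-- def gen_combinations(s):
--     keyletters = '10'
--     res = []
--     # Convert input string into a list so we can easily substitute letters
--     seq = list(s)
--
--     # Find indices of key letters in seq
--     indices = [ i for i, c in enumerate(seq) if c == 'X']
--
--     # Generate key letter combinations & place them into the list
--     for t in product(keyletters, repeat=len(indices)):
--         for i, c in zip(indices, t):
--             seq[i] = c
--         res.append(''.join(seq))
--     return res
-- ===== SOURCE B (Python) =====
-- def gen_combinations(s):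
--     # Split at the first 'X'; branch '1' then '0' there, recursing only on the tail.
--     pre, x, rest = s.partition('X')
--     if not x:
--         return [s]
--     tails = gen_combinations(rest)
--     return [pre + '1' + t for t in tails] + [pre + '0' + t for t in tails]
-- ===== Notes on version B (the rewrite author's own statement) =====
-- stated objective: simpler
-- what changed: Replaces itertools.product over precomputed X-indices plus in-place list substitution with a direct recursion that partitions the string at its first 'X' and prepends the prefix plus '1'/'0' to each expansion of the tail.
import Mathlib
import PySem

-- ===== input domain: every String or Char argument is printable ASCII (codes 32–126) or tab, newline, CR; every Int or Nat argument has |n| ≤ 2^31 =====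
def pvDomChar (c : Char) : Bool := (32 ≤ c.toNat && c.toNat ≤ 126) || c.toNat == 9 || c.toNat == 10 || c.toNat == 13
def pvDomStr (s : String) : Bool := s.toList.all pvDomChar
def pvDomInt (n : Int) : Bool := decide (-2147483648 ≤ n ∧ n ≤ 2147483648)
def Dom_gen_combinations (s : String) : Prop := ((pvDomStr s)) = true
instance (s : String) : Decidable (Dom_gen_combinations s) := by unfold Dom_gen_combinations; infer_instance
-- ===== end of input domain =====

-- B replaces A's itertools.product-over-X-indices with a direct structural recursion
-- on the string (expand the tail once, prepend '1'/'0' or the literal char); same output.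

-- ===== PORT A =====

-- itertools.product('10', repeat=n): nested loops, first coordinate varies slowest
def prod10 : Nat → List (List Char)
  | 0 => [[]]
  | n + 1 => (['1', '0']).flatMap (fun c => (prod10 n).map (fun t => c :: t))

-- the inner loop `for i, c in zip(indices, t): seq[i] = c`
def substLoop (indices : List Int) (t : List Char) (seq : List Char) : List Char :=
  (indices.zip t).foldl (fun q ic => PySem.List.pySetD q ic.1 ic.2) seq

def gen_combinations (s : String) : List String :=
  let seq := s.toList
  let indices := (PySem.List.enumerate seq).filterMap
    (fun ic => if ic.2 = 'X' then some ic.1 else none)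
  -- outer loop: res.append(''.join(seq)); seq is a list of single chars, so join = String.ofList
  let st := (prod10 indices.length).foldl
    (fun (st : List String × List Char) t =>
      let seq' := substLoop indices t st.2
      (st.1 ++ [String.ofList seq'], seq')) ([], seq)
  st.1

-- ===== PORT B =====

-- s.partition('X') for the 1-char separator 'X' is exact as
-- (takeWhile (· != 'X'), first char of dropWhile, rest of dropWhile):
-- dropWhile (· != 'X') = [] iff 'X' does not occur (the `not x` branch).
def genAltL (cs : List Char) : List (List Char) :=
  match h : cs.dropWhile (fun c => c != 'X') with
  | [] => [cs]
  | _ :: rest =>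
    let pre := cs.takeWhile (fun c => c != 'X')
    let tails := genAltL rest
    tails.map (fun t => pre ++ '1' :: t) ++ tails.map (fun t => pre ++ '0' :: t)
termination_by cs.length
decreasing_by
  have h1 : (cs.dropWhile (fun c => c != 'X')).length ≤ cs.length :=
    (List.dropWhile_sublist _).length_le
  rw [h] at h1
  simp at h1
  omega

def gen_combinations_alt (s : String) : List String :=
  (genAltL s.toList).map (fun t => String.ofList t)

-- ===== PRECONDITION & SPEC =====
def Spec_gen_combinations (s : String) (out : List String) : Prop := out = gen_combinations_alt s
instance (s : String) (out : List String) : Decidable (Spec_gen_combinations s out) := by unfold Spec_gen_combinations; infer_instance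

-- ===== CLAIM (what is proved, stated in full; the proofs are below) =====
def Claim_equal_gen_combinations : Prop := ∀ (s : String), Dom_gen_combinations s → Spec_gen_combinations s (gen_combinations s)

-- ===== LEMMAS AND PROOFS =====

-- the list of (Nat) positions of 'X' in cs, offset by k
def xIdx : List Char → Nat → List Nat
  | [], _ => []
  | c :: cs, k => if c = 'X' then k :: xIdx cs (k + 1) else xIdx cs (k + 1)

-- substitution with Nat indices
def setAll (q : List Char) (idxs : List Nat) (t : List Char) : List Char :=
  (idxs.zip t).foldl (fun q p => q.set p.1 p.2) q

-- "fill the X's of cs left-to-right with the chars of t" (extra X's stay, extra t is ignored)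
def fill : List Char → List Char → List Char
  | cs, [] => cs
  | [], _ :: _ => []
  | c :: cs, d :: ts => if c = 'X' then d :: fill cs ts else c :: fill cs (d :: ts)

set_option maxRecDepth 4096 in
lemma enum_filter_eq_xIdx (cs : List Char) (k : Nat) :
    (PySem.List.enumerate cs (k : Int)).filterMap
      (fun ic => if ic.2 = 'X' then some ic.1 else none)
      = (xIdx cs k).map (Nat.cast : Nat → Int) := by
  induction cs generalizing k with
  | nil => simp [PySem.List.enumerate_nil, xIdx]
  | cons c cs ih =>
    rw [PySem.List.enumerate_cons, List.filterMap_cons]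
    have hk : ((k : Int) + 1) = ((k + 1 : Nat) : Int) := by push_cast; ring
    rw [hk, ih (k + 1)]
    by_cases h : c = 'X' <;> simp [h, xIdx]

lemma substLoop_eq_setAll (idxs : List Nat) (t : List Char) (q : List Char) :
    substLoop (idxs.map (Nat.cast : Nat → Int)) t q = setAll q idxs t := by
  induction idxs generalizing t q with
  | nil => simp [substLoop, setAll]
  | cons i is ih =>
    cases t with
    | nil => simp [substLoop, setAll]
    | cons d ts =>
      simpa [substLoop, setAll, List.foldl_cons] using ih ts (q.set i d)

lemma xIdx_length (cs : List Char) (k k' : Nat) :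
    (xIdx cs k).length = (xIdx cs k').length := by
  induction cs generalizing k k' with
  | nil => rfl
  | cons c cs ih => by_cases h : c = 'X' <;> simp [xIdx, h, ih (k+1) (k'+1)]

lemma xIdx_ge (cs : List Char) (k : Nat) : ∀ i ∈ xIdx cs k, k ≤ i := by
  induction cs generalizing k with
  | nil => simp [xIdx]
  | cons c cs ih =>
    intro i hi
    by_cases h : c = 'X' <;> simp [xIdx, h] at hi
    · rcases hi with rfl | hi
      · exact le_refl _
      · exact le_trans (Nat.le_succ k) (ih (k+1) i hi)
    · exact le_trans (Nat.le_succ k) (ih (k+1) i hi)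

lemma xIdx_nodup (cs : List Char) (k : Nat) : (xIdx cs k).Nodup := by
  induction cs generalizing k with
  | nil => simp [xIdx]
  | cons c cs ih =>
    by_cases h : c = 'X' <;> simp [xIdx, h]
    · exact ⟨fun hmem => by have := xIdx_ge cs (k+1) k hmem; omega, ih (k+1)⟩
    · exact ih (k+1)

lemma set_setAll_comm (is : List Nat) (ts : List Char) (q : List Char) (i : Nat) (c : Char)
    (h : i ∉ is) : (setAll q is ts).set i c = setAll (q.set i c) is ts := by
  induction is generalizing ts q with
  | nil => simp [setAll]
  | cons j js ih =>
    cases ts with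
    | nil => simp [setAll]
    | cons d ds =>
      have hij : i ≠ j := fun hh => h (hh ▸ List.mem_cons_self)
      have hjs : i ∉ js := fun hh => h (List.mem_cons_of_mem _ hh)
      simp only [setAll, List.zip_cons_cons, List.foldl_cons]
      have h2 := ih ds (q.set j d) hjs
      simp only [setAll] at h2
      rw [h2, List.set_comm _ _ (Ne.symm hij)]

lemma setAll_overwrite (idxs : List Nat) (hnd : idxs.Nodup) (t t' : List Char)
    (hlen : t.length = t'.length) (q : List Char) :
    setAll (setAll q idxs t') idxs t = setAll q idxs t := by
  induction idxs generalizing t t' q with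
  | nil => simp [setAll]
  | cons i is ih =>
    cases t with
    | nil =>
      cases t' with
      | nil => simp [setAll]
      | cons d' ts' => simp at hlen
    | cons d ts =>
      cases t' with
      | nil => simp at hlen
      | cons d' ts' =>
        simp only [List.nodup_cons] at hnd
        simp only [setAll, List.zip_cons_cons, List.foldl_cons]
        have hc := set_setAll_comm is ts' (q.set i d') i d hnd.1
        simp only [setAll] at hc
        rw [hc, List.set_set]
        exact ih hnd.2 ts ts' (by simpa using hlen) _

lemma prod10_length (n : Nat) : ∀ t ∈ prod10 n, t.length = n := by
  induction n with
  | zero => simp [prod10]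
  | succ n ih =>
    intro t ht
    simp [prod10] at ht
    rcases ht with ⟨u, hu, rfl⟩ | ⟨u, hu, rfl⟩ <;> simp [ih u hu]

lemma loopA (idxs : List Nat) (hnd : idxs.Nodup) (ts : List (List Char))
    (hl : ∀ t ∈ ts, t.length = idxs.length) (res : List String) (q q0 : List Char)
    (hq : ∀ t, t.length = idxs.length → setAll q idxs t = setAll q0 idxs t) :
    (ts.foldl (fun (st : List String × List Char) t =>
        (st.1 ++ [String.ofList (setAll st.2 idxs t)], setAll st.2 idxs t)) (res, q)).1
      = res ++ ts.map (fun t => String.ofList (setAll q0 idxs t)) := by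
  induction ts generalizing res q with
  | nil => simp
  | cons t ts ih =>
    have ht : t.length = idxs.length := hl t List.mem_cons_self
    have hq0 : setAll q idxs t = setAll q0 idxs t := hq t ht
    simp only [List.foldl_cons, List.map_cons]
    rw [hq0]
    rw [ih (fun u hu => hl u (List.mem_cons_of_mem _ hu))
        (res ++ [String.ofList (setAll q0 idxs t)]) (setAll q0 idxs t)
        (fun u hu => setAll_overwrite idxs hnd u t (hu.trans ht.symm) q0)]
    simp

lemma set_at_prefix (p : List Char) (c d : Char) (cs : List Char) :
    (p ++ c :: cs).set p.length d = p ++ d :: cs := by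
  induction p with
  | nil => rfl
  | cons a as ih => simp [ih]

lemma setAll_eq_fill (cs : List Char) : ∀ (t : List Char) (p : List Char),
    setAll (p ++ cs) (xIdx cs p.length) t = p ++ fill cs t := by
  induction cs with
  | nil => intro t p; cases t <;> simp [setAll, xIdx, fill]
  | cons c cs ih =>
    intro t p
    by_cases h : c = 'X'
    · subst h
      cases t with
      | nil => simp [setAll, xIdx, fill]
      | cons d ts =>
        simp only [xIdx, fill, setAll, List.zip_cons_cons, List.foldl_cons, if_true]
        rw [set_at_prefix]
        have := ih ts (p ++ [d])
        simp only [setAll, List.length_append, List.length_cons, List.length_nil,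
          List.append_assoc, List.cons_append, List.nil_append] at this ⊢
        simpa using this
    · have hfill : fill (c :: cs) t = c :: fill cs t := by
        cases t <;> simp [fill, h]
      rw [hfill]
      simp only [xIdx, if_neg h]
      have := ih t (p ++ [c])
      simp only [List.length_append, List.length_cons, List.length_nil,
        List.append_assoc, List.cons_append, List.nil_append] at this
      simpa using this

lemma dropWhile_head_false {α : Type} (p : α → Bool) :
    ∀ (cs : List α) (d : α) (r : List α), cs.dropWhile p = d :: r → p d = false := by
  intro cs
  induction cs with
  | nil => intro d r h; simp [List.dropWhile] at h
  | cons c cs ih =>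
    intro d r h
    by_cases hp : p c
    · rw [List.dropWhile_cons_of_pos hp] at h; exact ih d r h
    · rw [List.dropWhile_cons_of_neg hp] at h
      cases h; simpa using hp

lemma xIdx_nil_of_noX (cs : List Char) (h : ∀ c ∈ cs, c ≠ 'X') : ∀ k, xIdx cs k = [] := by
  induction cs with
  | nil => intro k; rfl
  | cons c cs ih =>
    intro k
    have hc : c ≠ 'X' := h c List.mem_cons_self
    simp only [xIdx, if_neg hc]
    exact ih (fun x hx => h x (List.mem_cons_of_mem _ hx)) (k + 1)

lemma fill_nil_right (cs : List Char) : fill cs [] = cs := by cases cs <;> rfl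

lemma fill_append_noX (pre : List Char) (h : ∀ c ∈ pre, c ≠ 'X') (rest : List Char)
    (d : Char) (t : List Char) :
    fill (pre ++ 'X' :: rest) (d :: t) = pre ++ d :: fill rest t := by
  induction pre with
  | nil => simp [fill]
  | cons c ps ih =>
    have hc : c ≠ 'X' := h c List.mem_cons_self
    simp only [List.cons_append, fill, if_neg hc]
    rw [ih (fun x hx => h x (List.mem_cons_of_mem _ hx))]

lemma xIdx_append_len (as bs : List Char) : ∀ k,
    (xIdx (as ++ bs) k).length = (xIdx as k).length + (xIdx bs 0).length := by
  induction as with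
  | nil => intro k; simp [xIdx, xIdx_length bs k 0]
  | cons a as ih =>
    intro k
    by_cases h : a = 'X' <;> simp [xIdx, h, ih (k + 1)] <;> omega

lemma genAltL_eq_aux : ∀ (n : Nat) (cs : List Char), cs.length ≤ n →
    genAltL cs = (prod10 (xIdx cs 0).length).map (fun t => fill cs t) := by
  intro n
  induction n with
  | zero =>
    intro cs hlen
    have : cs = [] := List.eq_nil_of_length_eq_zero (Nat.le_zero.mp hlen)
    subst this
    rw [genAltL]
    simp [xIdx, prod10, fill]
  | succ n ih =>
    intro cs hlen
    rw [genAltL]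
    cases hd : cs.dropWhile (fun c => c != 'X') with
    | nil =>
      have hno : ∀ c ∈ cs, c ≠ 'X' := by
        intro c hc
        have := List.dropWhile_eq_nil_iff.mp hd c hc
        simpa using this
      rw [xIdx_nil_of_noX cs hno 0]
      simp [prod10, fill_nil_right]
    | cons d rest =>
      have hdX : d = 'X' := by
        have := dropWhile_head_false (fun c => c != 'X') cs d rest hd
        simpa using this
      subst hdX
      have hsplit : cs.takeWhile (fun c => c != 'X') ++ 'X' :: rest = cs := by
        rw [← hd]; exact List.takeWhile_append_dropWhile
      have hpre : ∀ c ∈ cs.takeWhile (fun c => c != 'X'), c ≠ 'X' := by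
        intro c hc
        have := List.mem_takeWhile_imp hc
        simpa using this
      have hrest : rest.length ≤ n := by
        have h1 : (cs.dropWhile (fun c => c != 'X')).length ≤ cs.length :=
          (List.dropWhile_sublist _).length_le
        rw [hd] at h1
        simp at h1
        omega
      have hxlen : (xIdx cs 0).length = (xIdx rest 0).length + 1 := by
        rw [← hsplit, xIdx_append_len _ _ 0,
            xIdx_nil_of_noX _ hpre 0]
        simp [xIdx, xIdx_length rest 1 0]
      rw [hxlen]
      simp only [prod10, List.flatMap_cons, List.flatMap_nil, List.map_append,
        List.map_map, List.append_nil, ih rest hrest]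
      congr 1 <;>
      · refine List.map_congr_left (fun t _ => ?_)
        simp only [Function.comp_apply]
        rw [← hsplit, fill_append_noX _ hpre, hsplit]

lemma genAltL_eq (cs : List Char) :
    genAltL cs = (prod10 (xIdx cs 0).length).map (fun t => fill cs t) :=
  genAltL_eq_aux cs.length cs (le_refl _)

-- ===== VERDICT (by name: the statement is the Claim_ definition above) =====
theorem gen_combinations_spec : Claim_equal_gen_combinations := by
  intro s _hdom
  unfold Spec_gen_combinations gen_combinations gen_combinations_alt
  set cs := s.toList with hcs
  have hidx : (PySem.List.enumerate cs).filterMap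
      (fun ic => if ic.2 = 'X' then some ic.1 else none)
      = (xIdx cs 0).map (Nat.cast : Nat → Int) := by
    simpa using enum_filter_eq_xIdx cs 0
  simp only [hidx, List.length_map, substLoop_eq_setAll]
  rw [loopA (xIdx cs 0) (xIdx_nodup cs 0) (prod10 (xIdx cs 0).length)
      (prod10_length _) [] cs cs (fun _ _ => rfl)]
  rw [genAltL_eq cs, List.map_map]
  simp only [List.nil_append]
  refine List.map_congr_left (fun t _ => ?_)
  have := setAll_eq_fill cs t []
  simp only [List.nil_append, List.length_nil] at this
  simp [Function.comp, this]
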